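-- pv_equiv track=rewrite | github.com/gene20898/TranSentCut | utils.py | genTrainingExamplesTrans
-- ===== SOURCE A (Python) =====
-- def genTrainingExamplesTrans(sentence_pairs, sentencesInSameParagraph):
--     negative_examples = []
--     for i,s in enumerate(sentencesInSameParagraph):
--         start = 0
--         pos = s.find(" ", start)
--         while(pos != -1):
--             left_same_sentence = s[0:pos]
--             right_same_sentence = s[pos+1:]
--             left_previous_sentences = " ".join( sentencesInSameParagraph[0:i] )
--             right_next_sentences = " ".join( sentencesInSameParagraph[min(i+1,len(sentencesInSameParagraph)-1):len(sentencesInSameParagraph)-1])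
--             start = pos + 1
--             negative_examples.append([(left_previous_sentences + " " + left_same_sentence).strip(), (right_same_sentence + " " + right_next_sentences).strip()])
--             pos = s.find(" ", start)
--
--     positive_examples = []
--     for i,pair in enumerate(sentence_pairs):
--         left_same_pair = pair[0]
--         right_same_pair = pair[1]
--         left_previous_pairs = " ".join( sentencesInSameParagraph[0:i] )
--         right_next_pairs = " ".join( sentencesInSameParagraph[min(i+2,len(sentencesInSameParagraph)-1):len(sentencesInSameParagraph)-1])
--         positive_examples.append([(left_previous_pairs + " " + left_same_pair).strip(), (right_same_pair + " " + right_next_pairs).strip()])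
--
--     return positive_examples, negative_examples
-- ===== SOURCE B (Python) =====
-- def _joins_back(words):
--     # out[k] = " ".join(words[k:]), built in one backward pass
--     out = []
--     for w in reversed(words):
--         out.append(w if not out else w + " " + out[-1])
--     out.reverse()
--     return out
--
--
-- def genTrainingExamplesTrans(sentence_pairs, sentencesInSameParagraph):
--     sents = sentencesInSameParagraph
--     n = len(sents)
--
--     negative_examples = []
--     for i, s in enumerate(sents):
--         words = s.split(" ")          # split once instead of repeated find()
--         if len(words) > 1:
--             lp = " ".join(sents[:i])              # hoisted: once per sentence, not once per space
--             rn = " ".join(sents[i + 1:n - 1])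
--             rsuf = _joins_back(words)             # right parts of every split, one backward pass
--             left = words[0]
--             for w, r in zip(words[1:], rsuf[1:]):
--                 negative_examples.append([(lp + " " + left).strip(), (r + " " + rn).strip()])
--                 left = left + " " + w
--
--     positive_examples = []
--     for i, pair in enumerate(sentence_pairs):
--         lp = " ".join(sents[:i])
--         rn = " ".join(sents[min(i + 2, n):n - 1])
--         positive_examples.append([(lp + " " + pair[0]).strip(), (pair[1] + " " + rn).strip()])
--     return positive_examples, negative_examples
-- ===== Notes on version B (the rewrite author's own statement) =====
-- stated objective: alternative
-- what changed: Negative examples: each sentence is split into words once and the right parts of all splits are built in one backward suffix-join pass, with the loop-invariant previous/next-sentence context joins hoisted out of the per-space inner loop, replacing A's repeated find() rescans, slicing, and re-joining of the paragraph at every space.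
import Mathlib
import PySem

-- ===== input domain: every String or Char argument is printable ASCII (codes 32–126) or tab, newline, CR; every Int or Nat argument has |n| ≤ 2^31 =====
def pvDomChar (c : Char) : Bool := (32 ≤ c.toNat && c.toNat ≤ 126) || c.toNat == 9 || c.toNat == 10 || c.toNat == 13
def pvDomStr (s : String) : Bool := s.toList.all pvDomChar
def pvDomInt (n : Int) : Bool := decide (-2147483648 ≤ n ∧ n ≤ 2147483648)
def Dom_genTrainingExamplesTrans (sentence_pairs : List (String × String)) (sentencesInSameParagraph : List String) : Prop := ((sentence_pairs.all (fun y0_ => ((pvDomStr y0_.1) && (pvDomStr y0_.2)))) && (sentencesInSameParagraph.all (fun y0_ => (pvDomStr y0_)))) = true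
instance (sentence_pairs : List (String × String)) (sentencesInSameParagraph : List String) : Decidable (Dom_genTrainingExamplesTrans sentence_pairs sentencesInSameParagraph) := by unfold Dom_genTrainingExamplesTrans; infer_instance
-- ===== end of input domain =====

-- B builds negative examples by splitting each sentence into words once (backward suffix-join pass,
-- context joins hoisted out of the per-space loop) instead of A's find()-loop that re-slices and re-joins per space.


-- ===== PORT A =====
-- the inner while-loop over s.find(" ", start); fuel = s.length+1 only makes the loop total
-- (pos strictly increases each iteration, so s.length+1 iterations always suffice)
def pvA_negLoop (sents : List String) (i : Nat) (s : String) (fuel : Nat) (start : Int)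
    (acc : List (List String)) : List (List String) :=
  match fuel with
  | 0 => acc
  | Nat.succ fuel =>
    let pos := PySem.Str.findFrom s " " start
    if pos = -1 then acc
    else
      let left_same := PySem.Str.slice s (some 0) (some pos)
      let right_same := PySem.Str.slice s (some (pos + 1)) none
      let n : Int := sents.length
      let lprev := PySem.Str.join " " (PySem.List.slice sents (some 0) (some (i : Int)))
      let rnext := PySem.Str.join " " (PySem.List.slice sents (some (min ((i : Int) + 1) (n - 1))) (some (n - 1)))
      pvA_negLoop sents i s fuel (pos + 1)
        (acc ++ [[PySem.Str.strip (lprev ++ " " ++ left_same), PySem.Str.strip (right_same ++ " " ++ rnext)]])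

def pvA_negOuter (sents : List String) (i : Nat) (rest : List String)
    (acc : List (List String)) : List (List String) :=
  match rest with
  | [] => acc
  | s :: rest => pvA_negOuter sents (i + 1) rest (pvA_negLoop sents i s (s.toList.length + 1) 0 acc)

def pvA_posLoop (sents : List String) (i : Nat) (rest : List (String × String))
    (acc : List (List String)) : List (List String) :=
  match rest with
  | [] => acc
  | pair :: rest =>
    let n : Int := sents.length
    let lprev := PySem.Str.join " " (PySem.List.slice sents (some 0) (some (i : Int)))
    let rnext := PySem.Str.join " " (PySem.List.slice sents (some (min ((i : Int) + 2) (n - 1))) (some (n - 1)))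
    pvA_posLoop sents (i + 1) rest
      (acc ++ [[PySem.Str.strip (lprev ++ " " ++ pair.1), PySem.Str.strip (pair.2 ++ " " ++ rnext)]])

def genTrainingExamplesTrans (sentence_pairs : List (String × String)) (sentencesInSameParagraph : List String) : List (List String) × List (List String) :=
  (pvA_posLoop sentencesInSameParagraph 0 sentence_pairs [],
   pvA_negOuter sentencesInSameParagraph 0 sentencesInSameParagraph [])

-- ===== PORT B =====
-- B works on code-point lists per sentence; s.split(" ") is ported as List.splitOn ' ' (exact for a one-character separator)
def pvB_joinsBack (l : List (List Char)) : List (List Char) :=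
  match l with
  | [] => []
  | w :: ws =>
    match pvB_joinsBack ws with
    | [] => [w]
    | r :: rs => (w ++ ' ' :: r) :: r :: rs

def pvB_negGo (lp rn : List Char) (left : List Char) (ws rs : List (List Char)) : List (List String) :=
  match ws, rs with
  | w :: ws, r :: rs =>
      [String.ofList (PySem.Chars.strip (lp ++ ' ' :: left)),
       String.ofList (PySem.Chars.strip (r ++ ' ' :: rn))]
        :: pvB_negGo lp rn (left ++ ' ' :: w) ws rs
  | _, _ => []

def pvB_negSent (lp rn : List Char) (words : List (List Char)) : List (List String) :=
  match words, pvB_joinsBack words with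
  | w :: ws, _ :: rs => pvB_negGo lp rn w ws rs
  | _, _ => []

def pvB_negOuter (sents : List String) (i : Nat) (rest : List String) : List (List String) :=
  match rest with
  | [] => []
  | s :: rest =>
      (let words := s.toList.splitOn ' '
       if words.length > 1 then
         pvB_negSent (PySem.Str.join " " (sents.take i)).toList
           (PySem.Str.join " " ((sents.take (sents.length - 1)).drop (i + 1))).toList words
       else []) ++ pvB_negOuter sents (i + 1) rest

def pvB_posLoop (sents : List String) (n : Nat) (i : Nat) (rest : List (String × String)) : List (List String) :=
  match rest with
  | [] => []
  | pair :: rest =>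
      [PySem.Str.strip (PySem.Str.join " " (sents.take i) ++ " " ++ pair.1),
       PySem.Str.strip (pair.2 ++ " " ++ PySem.Str.join " " ((sents.take (n - 1)).drop (min (i + 2) n)))]
        :: pvB_posLoop sents n (i + 1) rest

def genTrainingExamplesTrans_alt (sentence_pairs : List (String × String)) (sentencesInSameParagraph : List String) : List (List String) × List (List String) :=
  (pvB_posLoop sentencesInSameParagraph sentencesInSameParagraph.length 0 sentence_pairs,
   pvB_negOuter sentencesInSameParagraph 0 sentencesInSameParagraph)

-- ===== PRECONDITION & SPEC =====
def Spec_genTrainingExamplesTrans (sentence_pairs : List (String × String)) (sentencesInSameParagraph : List String) (out : List (List String) × List (List String)) : Prop := out = genTrainingExamplesTrans_alt sentence_pairs sentencesInSameParagraph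
instance (sentence_pairs : List (String × String)) (sentencesInSameParagraph : List String) (out : List (List String) × List (List String)) : Decidable (Spec_genTrainingExamplesTrans sentence_pairs sentencesInSameParagraph out) := by unfold Spec_genTrainingExamplesTrans; infer_instance

-- ===== CLAIM (what is proved, stated in full; the proofs are below) =====
def Claim_equal_genTrainingExamplesTrans : Prop := ∀ (sentence_pairs : List (String × String)) (sentencesInSameParagraph : List String), Dom_genTrainingExamplesTrans sentence_pairs sentencesInSameParagraph → Spec_genTrainingExamplesTrans sentence_pairs sentencesInSameParagraph (genTrainingExamplesTrans sentence_pairs sentencesInSameParagraph)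

-- ===== LEMMAS AND PROOFAREA =====

-- proof-side abbreviations (char level)
def pvJ (l : List (List Char)) : List Char := PySem.Chars.join [' '] l

def pvLP (L : List (List Char)) (i : Nat) : List Char := pvJ (L.take i)

def pvRN (L : List (List Char)) (i : Nat) : List Char := pvJ (L.dropLast.drop i)

def pvRend (lp rn : List Char) (p : List Char × List Char) : List String :=
  [String.ofList (PySem.Chars.strip (lp ++ ' ' :: p.1)),
   String.ofList (PySem.Chars.strip (p.2 ++ ' ' :: rn))]

def pvSplits : List Char → List (List Char × List Char)
  | [] => []
  | c :: cs => (if c = ' ' then [(([] : List Char), cs)] else []) ++ (pvSplits cs).map (fun p => (c :: p.1, p.2))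

def pvEmits (rn : List Char) : List Char → List (List Char) → List (List String)
  | _, [] => []
  | q, w :: ws =>
      [String.ofList (PySem.Chars.strip q),
       String.ofList (PySem.Chars.strip (pvJ (w :: ws) ++ ' ' :: rn))]
        :: pvEmits rn (q ++ ' ' :: w) ws

def pvLPA (sents : List String) (i : Nat) : String :=
  PySem.Str.join " " (PySem.List.slice sents (some 0) (some (i : Int)))

def pvRNA (sents : List String) (i : Nat) (c : Int) : String :=
  PySem.Str.join " " (PySem.List.slice sents (some (min ((i : Int) + c) ((sents.length : Int) - 1))) (some ((sents.length : Int) - 1)))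

def pvNEGfrom (L : List (List Char)) : Nat → List (List Char) → List (List String)
  | _, [] => []
  | i, c :: M => (pvSplits c).map (pvRend (pvLP L i) (pvRN L (i + 1))) ++ pvNEGfrom L (i + 1) M

def pvPOSfrom (L : List (List Char)) : Nat → List (String × String) → List (List String)
  | _, [] => []
  | i, pair :: rest =>
      pvRend (pvLP L i) (pvRN L (min (i + 2) L.length)) (pair.1.toList, pair.2.toList)
        :: pvPOSfrom L (i + 1) rest

lemma pv_sp : (" " : String).toList = [' '] := by decide

-- pvSplits basics
lemma pvSplits_of_not_mem {cs : List Char} (h : ' ' ∉ cs) : pvSplits cs = [] := by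
  induction cs with
  | nil => rfl
  | cons c cs ih =>
    have hc : ¬ c = ' ' := fun hc => h (hc ▸ List.mem_cons_self)
    have hcs : ' ' ∉ cs := fun hm => h (List.mem_cons_of_mem _ hm)
    simp [pvSplits, hc, ih hcs]

lemma pvSplits_append (u v : List Char) (h : ' ' ∉ u) :
    pvSplits (u ++ ' ' :: v) = (u, v) :: (pvSplits v).map (fun p => (u ++ ' ' :: p.1, p.2)) := by
  induction u with
  | nil => simp [pvSplits]
  | cons c u ih =>
    have hc : ¬ c = ' ' := fun hc => h (hc ▸ List.mem_cons_self)
    have hu : ' ' ∉ u := fun hm => h (List.mem_cons_of_mem _ hm)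
    simp [pvSplits, hc, ih hu, List.map_map, Function.comp_def]

lemma pv_first_space {cs : List Char} (h : ' ' ∈ cs) :
    ∃ u v, cs = u ++ ' ' :: v ∧ ' ' ∉ u := by
  induction cs with
  | nil => cases h
  | cons c cs ih =>
    by_cases hc : c = ' '
    · exact ⟨[], cs, by simp [hc], by simp⟩
    · rcases ih ((List.mem_cons.mp h).resolve_left (fun he => hc he.symm)) with ⟨u, v, h1, h2⟩
      exact ⟨c :: u, v, by simp [h1], by
        intro hm
        rcases List.mem_cons.mp hm with h3 | h3
        · exact hc h3.symm
        · exact h2 h3⟩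

-- List.splitOn ' ' facts
lemma pv_splitOn_not_mem {cs : List Char} (h : ' ' ∉ cs) : cs.splitOn ' ' = [cs] := by
  induction cs with
  | nil => rfl
  | cons c cs ih =>
    have hc : (c == ' ') = false := by
      simp only [beq_eq_false_iff_ne, ne_eq]
      exact fun he => h (he ▸ List.mem_cons_self)
    have hcs := ih (fun hm => h (List.mem_cons_of_mem _ hm))
    rw [show (c :: cs).splitOn ' ' = List.splitOnP (· == ' ') (c :: cs) from rfl, List.splitOnP_cons, hc]
    rw [show List.splitOnP (· == ' ') cs = cs.splitOn ' ' from rfl, hcs]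
    simp

lemma pv_splitOn_append (u v : List Char) (h : ' ' ∉ u) :
    (u ++ ' ' :: v).splitOn ' ' = u :: v.splitOn ' ' := by
  induction u with
  | nil =>
    rw [List.nil_append, show (' ' :: v).splitOn ' ' = List.splitOnP (· == ' ') (' ' :: v) from rfl,
      List.splitOnP_cons]
    simp
    rfl
  | cons c u ih =>
    have hc : (c == ' ') = false := by
      simp only [beq_eq_false_iff_ne, ne_eq]
      exact fun he => h (he ▸ List.mem_cons_self)
    have hu := ih (fun hm => h (List.mem_cons_of_mem _ hm))
    rw [List.cons_append, show ((c :: (u ++ ' ' :: v)).splitOn ' ') = List.splitOnP (· == ' ') (c :: (u ++ ' ' :: v)) from rfl,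
      List.splitOnP_cons, hc]
    rw [show List.splitOnP (· == ' ') (u ++ ' ' :: v) = (u ++ ' ' :: v).splitOn ' ' from rfl, hu]
    simp

lemma pv_splitOn_ne_nil (cs : List Char) : cs.splitOn ' ' ≠ [] := by
  by_cases hm : ' ' ∈ cs
  · rcases pv_first_space hm with ⟨u, v, rfl, hu⟩
    rw [pv_splitOn_append u v hu]
    simp
  · rw [pv_splitOn_not_mem hm]
    simp

lemma pv_join_splitOn (v : List Char) : pvJ (v.splitOn ' ') = v := by
  simp only [pvJ, PySem.Chars.join]; exact List.intercalate_splitOn v ' '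

-- joinsBack
lemma pv_joinsBack_cons (w : List Char) (ws : List (List Char)) :
    pvB_joinsBack (w :: ws) = pvJ (w :: ws) :: pvB_joinsBack ws := by
  induction ws generalizing w with
  | nil => simp [pvB_joinsBack, pvJ, PySem.Chars.join_singleton]
  | cons x xs ih =>
    rw [show pvB_joinsBack (w :: x :: xs)
        = (match pvB_joinsBack (x :: xs) with
           | [] => [w]
           | r :: rs => (w ++ ' ' :: r) :: r :: rs) from rfl, ih x]
    simp [pvJ, PySem.Chars.join_cons_cons]

lemma pv_negGo_eq (ws : List (List Char)) : ∀ lp rn left,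
    pvB_negGo lp rn left ws (pvB_joinsBack ws) = pvEmits rn (lp ++ ' ' :: left) ws := by
  induction ws with
  | nil => intro lp rn left; rfl
  | cons w ws ih =>
    intro lp rn left
    rw [pv_joinsBack_cons]
    show ([String.ofList (PySem.Chars.strip (lp ++ ' ' :: left)),
           String.ofList (PySem.Chars.strip (pvJ (w :: ws) ++ ' ' :: rn))]
          :: pvB_negGo lp rn (left ++ ' ' :: w) ws (pvB_joinsBack ws)) = _
    rw [ih lp rn (left ++ ' ' :: w)]
    show _ = ([String.ofList (PySem.Chars.strip (lp ++ ' ' :: left)),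
           String.ofList (PySem.Chars.strip (pvJ (w :: ws) ++ ' ' :: rn))]
          :: pvEmits rn ((lp ++ ' ' :: left) ++ ' ' :: w) ws)
    simp [List.append_assoc]

lemma pvRend_shift (q rn u a b : List Char) :
    pvRend q rn (u ++ ' ' :: a, b) = pvRend (q ++ ' ' :: u) rn (a, b) := by
  simp [pvRend]

lemma pv_map_splits_emits (N : Nat) : ∀ (cs : List Char), cs.length ≤ N → ∀ q rn w ws,
    cs.splitOn ' ' = w :: ws →
    (pvSplits cs).map (pvRend q rn) = pvEmits rn (q ++ ' ' :: w) ws := by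
  induction N with
  | zero =>
    intro cs hcs q rn w ws hsplit
    have : cs = [] := List.length_eq_zero_iff.mp (by omega)
    subst this
    have : ([] : List Char).splitOn ' ' = [[]] := rfl
    rw [this] at hsplit
    cases hsplit
    rfl
  | succ N ih =>
    intro cs hcs q rn w ws hsplit
    by_cases hm : ' ' ∈ cs
    · rcases pv_first_space hm with ⟨u, v, rfl, hu⟩
      rw [pv_splitOn_append u v hu] at hsplit
      injection hsplit with h1 h2
      subst h1; subst h2
      rw [pvSplits_append u v hu]
      rcases hv : v.splitOn ' ' with _ | ⟨w', ws'⟩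
      · exact absurd hv (pv_splitOn_ne_nil v)
      · have hvlen : v.length ≤ N := by
          have := hcs
          simp [List.length_append] at this
          omega
        have htail := ih v hvlen (q ++ ' ' :: u) rn w' ws' hv
        have hJ : pvJ (w' :: ws') = v := by rw [← hv]; exact pv_join_splitOn v
        show pvRend q rn (u, v) :: ((pvSplits v).map (fun p => (u ++ ' ' :: p.1, p.2))).map (pvRend q rn)
            = pvEmits rn (q ++ ' ' :: u) (w' :: ws')
        rw [show pvEmits rn (q ++ ' ' :: u) (w' :: ws')
            = ([String.ofList (PySem.Chars.strip (q ++ ' ' :: u)),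
                String.ofList (PySem.Chars.strip (pvJ (w' :: ws') ++ ' ' :: rn))]
               :: pvEmits rn ((q ++ ' ' :: u) ++ ' ' :: w') ws') from rfl, hJ, ← htail]
        rw [List.map_map]
        congr 1
        apply List.map_congr_left
        intro p _
        show pvRend q rn (u ++ ' ' :: p.1, p.2) = pvRend (q ++ ' ' :: u) rn p
        rw [pvRend_shift]
    · rw [pv_splitOn_not_mem hm] at hsplit
      cases hsplit
      rw [pvSplits_of_not_mem hm]
      rfl

lemma pv_negSent_eq (lp rn cs : List Char) :
    pvB_negSent lp rn (cs.splitOn ' ') = (pvSplits cs).map (pvRend lp rn) := by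
  rcases h : cs.splitOn ' ' with _ | ⟨w, ws⟩
  · exact absurd h (pv_splitOn_ne_nil cs)
  · rw [show pvB_negSent lp rn (w :: ws)
        = (match (w :: ws : List (List Char)), pvB_joinsBack (w :: ws) with
           | w :: ws, _ :: rs => pvB_negGo lp rn w ws rs
           | _, _ => []) from rfl, pv_joinsBack_cons]
    show pvB_negGo lp rn w ws (pvB_joinsBack ws) = _
    rw [pv_negGo_eq ws lp rn w]
    exact (pv_map_splits_emits cs.length cs le_rfl lp rn w ws h).symm

lemma pv_negGuard (lp rn cs : List Char) :
    (if (cs.splitOn ' ').length > 1 then pvB_negSent lp rn (cs.splitOn ' ') else [])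
      = (pvSplits cs).map (pvRend lp rn) := by
  by_cases hm : ' ' ∈ cs
  · rw [if_pos ?hgt]
    · exact pv_negSent_eq lp rn cs
    case hgt =>
      rcases pv_first_space hm with ⟨u, v, rfl, hu⟩
      rw [pv_splitOn_append u v hu]
      have h1 : 0 < (v.splitOn ' ').length := List.length_pos_iff.mpr (pv_splitOn_ne_nil v)
      simp only [List.length_cons, gt_iff_lt]
      omega
  · rw [pv_splitOn_not_mem hm, if_neg (by simp), pvSplits_of_not_mem hm]
    rfl

-- slices / contexts
lemma pv_slice_zero {α : Type} (xs : List α) (i : Nat) :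
    PySem.List.slice xs (some 0) (some (i : Int)) = xs.take i := by
  simp

lemma pv_LPA_toList (sents : List String) (i : Nat) :
    (pvLPA sents i).toList = pvLP (sents.map String.toList) i := by
  unfold pvLPA pvLP
  rw [PySem.Str.toList_join, pv_slice_zero]
  simp [pvJ, pv_sp, List.map_take]

lemma pv_slice_ctx (sents : List String) (i c : Nat) (hn : 1 ≤ sents.length) :
    PySem.List.slice sents (some (min ((i : Int) + (c : Int)) ((sents.length : Int) - 1))) (some ((sents.length : Int) - 1))
      = sents.dropLast.drop (min (i + c) (sents.length - 1)) := by
  have hmin : min ((i : Int) + (c : Int)) ((sents.length : Int) - 1)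
      = ((min (i + c) (sents.length - 1) : Nat) : Int) := by
    rw [Nat.cast_min]; omega
  have hstop : ((sents.length : Int) - 1) = ((sents.length - 1 : Nat) : Int) := by omega
  rw [hmin, hstop, PySem.List.slice_natCast]
  rw [List.dropLast_eq_take, List.drop_take]

lemma pv_RNA_neg (sents : List String) (i : Nat) (h : i < sents.length) :
    (pvRNA sents i 1).toList = pvRN (sents.map String.toList) (i + 1) := by
  unfold pvRNA pvRN
  rw [PySem.Str.toList_join]
  have hn : 1 ≤ sents.length := by omega
  have hsl := pv_slice_ctx sents i 1 hn
  push_cast at hsl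
  rw [hsl]
  have hdrop : sents.dropLast.drop (min (i + 1) (sents.length - 1)) = sents.dropLast.drop (i + 1) := by
    by_cases h1 : (i + 1) ≤ sents.length - 1
    · rw [min_eq_left h1]
    · have e1 : sents.dropLast.drop (min (i + 1) (sents.length - 1)) = [] :=
        List.drop_eq_nil_of_le (by rw [List.length_dropLast]; omega)
      have e2 : sents.dropLast.drop (i + 1) = [] :=
        List.drop_eq_nil_of_le (by rw [List.length_dropLast]; omega)
      rw [e1, e2]
  rw [hdrop]
  simp [pvJ, pv_sp, List.map_drop, List.map_dropLast]

lemma pv_RNA_pos (sents : List String) (i : Nat) :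
    (pvRNA sents i 2).toList = pvRN (sents.map String.toList) (min (i + 2) sents.length) := by
  unfold pvRNA pvRN
  rw [PySem.Str.toList_join]
  rcases Nat.eq_zero_or_pos sents.length with h0 | hn
  · have : sents = [] := List.length_eq_zero_iff.mp h0
    subst this
    simp [PySem.List.slice, pvJ, PySem.Chars.join_nil]
  · have hsl := pv_slice_ctx sents i 2 hn
    push_cast at hsl
    rw [hsl]
    have hdrop : sents.dropLast.drop (min (i + 2) (sents.length - 1))
        = sents.dropLast.drop (min (i + 2) sents.length) := by
      by_cases h1 : (i + 2) ≤ sents.length - 1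
      · rw [min_eq_left h1, min_eq_left (by omega : i + 2 ≤ sents.length)]
      · have e1 : sents.dropLast.drop (min (i + 2) (sents.length - 1)) = [] :=
          List.drop_eq_nil_of_le (by rw [List.length_dropLast]; omega)
        have e2 : sents.dropLast.drop (min (i + 2) sents.length) = [] :=
          List.drop_eq_nil_of_le (by rw [List.length_dropLast]; omega)
        rw [e1, e2]
    rw [hdrop]
    simp [pvJ, pv_sp, List.map_drop, List.map_dropLast]

-- pfx / sfx specs
-- B context joins at char level
lemma pv_BLP_toList (sents : List String) (i : Nat) :
    (PySem.Str.join " " (sents.take i)).toList = pvLP (sents.map String.toList) i := by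
  rw [PySem.Str.toList_join]
  simp [pvLP, pvJ, pv_sp, List.map_take]

lemma pv_BRN_toList (sents : List String) (j : Nat) :
    (PySem.Str.join " " ((sents.take (sents.length - 1)).drop j)).toList
      = pvRN (sents.map String.toList) j := by
  rw [PySem.Str.toList_join]
  simp [pvRN, pvJ, pv_sp, List.map_drop, List.map_take, List.dropLast_eq_take]

-- A inner loop characterisation
set_option maxHeartbeats 1000000 in
lemma pv_A_negLoop_eq (sents : List String) (i : Nat) (s : String) :
    ∀ (fuel k : Nat) (acc : List (List String)), k ≤ s.toList.length →
    s.toList.length + 1 - k ≤ fuel →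
    pvA_negLoop sents i s fuel (k : Int) acc
      = acc ++ (pvSplits (s.toList.drop k)).map
          (fun p => pvRend (pvLPA sents i).toList (pvRNA sents i 1).toList (s.toList.take k ++ p.1, p.2)) := by
  intro fuel
  induction fuel with
  | zero => intro k acc hk hf; omega
  | succ fuel ih =>
    intro k acc hk hf
    rw [show pvA_negLoop sents i s (fuel + 1) (k : Int) acc
        = (if PySem.Str.findFrom s " " (k : Int) = -1 then acc
           else pvA_negLoop sents i s fuel (PySem.Str.findFrom s " " (k : Int) + 1)
             (acc ++ [[PySem.Str.strip (pvLPA sents i ++ " " ++ PySem.Str.slice s (some 0) (some (PySem.Str.findFrom s " " (k : Int)))),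
                       PySem.Str.strip (PySem.Str.slice s (some (PySem.Str.findFrom s " " (k : Int) + 1)) none ++ " " ++ pvRNA sents i 1)]])) from rfl]
    rw [PySem.Str.findFrom_eq, pv_sp, PySem.Chars.findFrom_natCast s.toList [' '] k hk]
    by_cases hneg : PySem.Chars.find (s.toList.drop k) [' '] = -1
    · rw [if_pos (by rw [hneg]; simp)]
      have hnm : ' ' ∉ s.toList.drop k := by
        intro hm
        rcases List.append_of_mem hm with ⟨l1, l2, he⟩
        exact (PySem.Chars.find_eq_neg_one_iff _ _).mp hneg ⟨l1, l2, by simp [he]⟩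
      rw [pvSplits_of_not_mem hnm]
      simp
    · rw [if_neg hneg]
      have hq0 : 0 ≤ PySem.Chars.find (s.toList.drop k) [' '] := by
        have := PySem.Chars.neg_one_le_find (s.toList.drop k) [' ']
        omega
      set q := PySem.Chars.find (s.toList.drop k) [' '] with hqdef
      obtain ⟨qn, hqn⟩ : ∃ qn : Nat, q = (qn : Int) := ⟨q.toNat, (Int.toNat_of_nonneg hq0).symm⟩
      have hspec := PySem.Chars.find_spec (s := s.toList.drop k) (sub := [' ']) hq0
      have hqt : q.toNat = qn := by omega
      rw [hqt] at hspec
      have hdd : (s.toList.drop k).drop qn = s.toList.drop (k + qn) := by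
        rw [List.drop_drop, Nat.add_comm]
      rw [hdd] at hspec
      rcases List.cons_prefix_iff.mp hspec.1 with ⟨restl, hrest0, -⟩
      have hlt : k + qn < s.toList.length := by
        by_contra hge
        rw [List.drop_eq_nil_of_le (by omega)] at hrest0
        cases hrest0
      have hrest : s.toList.drop (k + qn) = ' ' :: s.toList.drop (k + qn + 1) := by
        have h4 := List.drop_eq_getElem_cons (l := s.toList) (i := k + qn) hlt
        rw [hrest0] at h4
        rw [hrest0, (List.cons_eq_cons.mp h4).2]
      have hu : ' ' ∉ (s.toList.drop k).take qn := by
        intro hm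
        rcases List.getElem_of_mem hm with ⟨j, hj, hje⟩
        have hj1 : j < qn := lt_of_lt_of_le hj (by rw [List.length_take]; exact min_le_left _ _)
        have hj2 : j < (s.toList.drop k).length := by
          rw [List.length_take] at hj
          exact lt_of_lt_of_le hj (min_le_right _ _)
        apply hspec.2 j hj1
        rw [List.drop_eq_getElem_cons hj2]
        rw [show (s.toList.drop k)[j] = ' ' from by rw [← List.getElem_take]; exact hje]
        exact List.cons_prefix_iff.mpr ⟨_, rfl, List.nil_prefix⟩
      have hc1 : (k : Int) + q + 1 = ((k + qn + 1 : Nat) : Int) := by omega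
      have hc2 : (k : Int) + q = ((k + qn : Nat) : Int) := by omega
      rw [hc1, hc2]
      rw [ih (k + qn + 1) _ (by omega) (by omega)]
      have hdecomp : s.toList.drop k = (s.toList.drop k).take qn ++ ' ' :: s.toList.drop (k + qn + 1) := by
        conv_lhs => rw [← List.take_append_drop qn (s.toList.drop k), hdd, hrest]
      have htake : s.toList.take k ++ (s.toList.drop k).take qn = s.toList.take (k + qn) :=
        (List.take_add).symm
      have htake1 : s.toList.take (k + qn + 1) = (s.toList.take k ++ (s.toList.drop k).take qn) ++ [' '] := by
        rw [show k + qn + 1 = (k + qn) + 1 from rfl, List.take_add, hrest, htake]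
        rfl
      have he1 : PySem.Str.strip (pvLPA sents i ++ " " ++ PySem.Str.slice s (some 0) (some ((k + qn : Nat) : Int)))
          = String.ofList (PySem.Chars.strip ((pvLPA sents i).toList ++ ' ' :: (s.toList.take k ++ (s.toList.drop k).take qn))) := by
        apply String.toList_inj.mp
        rw [PySem.Str.toList_strip, String.toList_ofList]
        have harg : (pvLPA sents i ++ " " ++ PySem.Str.slice s (some 0) (some ((k + qn : Nat) : Int))).toList
            = (pvLPA sents i).toList ++ ' ' :: (s.toList.take k ++ (s.toList.drop k).take qn) := by
          rw [String.toList_append, String.toList_append, PySem.Str.toList_slice]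
          rw [show PySem.Chars.slice s.toList (some 0) (some ((k + qn : Nat) : Int))
              = PySem.List.slice s.toList (some 0) (some ((k + qn : Nat) : Int)) from by simp]
          rw [pv_slice_zero, ← htake]
          simp [pv_sp]
        rw [harg]
      have he2 : PySem.Str.strip (PySem.Str.slice s (some ((k + qn + 1 : Nat) : Int)) none ++ " " ++ pvRNA sents i 1)
          = String.ofList (PySem.Chars.strip (s.toList.drop (k + qn + 1) ++ ' ' :: (pvRNA sents i 1).toList)) := by
        apply String.toList_inj.mp
        rw [PySem.Str.toList_strip, String.toList_ofList]
        have harg : (PySem.Str.slice s (some ((k + qn + 1 : Nat) : Int)) none ++ " " ++ pvRNA sents i 1).toList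
            = s.toList.drop (k + qn + 1) ++ ' ' :: (pvRNA sents i 1).toList := by
          rw [String.toList_append, String.toList_append, PySem.Str.toList_slice]
          rw [show PySem.Chars.slice s.toList (some ((k + qn + 1 : Nat) : Int)) none
              = PySem.List.slice s.toList (some ((k + qn + 1 : Nat) : Int)) none from by simp]
          rw [PySem.List.slice_from s.toList (by positivity)]
          simp [pv_sp]
          omega
        rw [harg]
      conv_rhs => rw [hdecomp, pvSplits_append _ _ hu]
      rw [List.map_cons, List.map_map]
      rw [List.append_assoc, List.singleton_append]
      apply congrArg (acc ++ ·)
      apply (List.cons_eq_cons).mpr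
      constructor
      · rw [he1, he2]
        simp [pvRend]
      · apply List.map_congr_left
        intro p _
        simp [pvRend, htake1, List.append_assoc]

-- A outer loops
lemma pv_A_negOuter_eq (sents : List String) : ∀ (post : List String) (i : Nat) (acc : List (List String)),
    sents.drop i = post →
    pvA_negOuter sents i post acc = acc ++ pvNEGfrom (sents.map String.toList) i (post.map String.toList) := by
  intro post
  induction post with
  | nil => intro i acc _; simp [pvA_negOuter, pvNEGfrom]
  | cons st post ih =>
    intro i acc hdrop
    have hi : i < sents.length := by
      by_contra hge
      rw [List.drop_eq_nil_of_le (by omega)] at hdrop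
      cases hdrop
    have hpost : sents.drop (i + 1) = post := by
      rw [← List.tail_drop, hdrop]
      rfl
    show pvA_negOuter sents (i + 1) post (pvA_negLoop sents i st (st.toList.length + 1) 0 acc) = _
    rw [show (0 : Int) = ((0 : Nat) : Int) from rfl]
    rw [pv_A_negLoop_eq sents i st (st.toList.length + 1) 0 acc (by omega) (by omega)]
    rw [ih (i + 1) _ hpost]
    rw [pv_LPA_toList, pv_RNA_neg sents i hi]
    simp [pvNEGfrom, List.append_assoc]

lemma pv_strip_append_str (x y : String) :
    PySem.Str.strip (x ++ " " ++ y) = String.ofList (PySem.Chars.strip (x.toList ++ ' ' :: y.toList)) := by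
  apply String.toList_inj.mp
  rw [PySem.Str.toList_strip, String.toList_ofList]
  have harg : (x ++ " " ++ y).toList = x.toList ++ ' ' :: y.toList := by
    simp [String.toList_append, pv_sp]
  rw [harg]

lemma pv_A_posLoop_eq (sents : List String) (pairs : List (String × String)) : ∀ (i : Nat) (acc : List (List String)),
    pvA_posLoop sents i pairs acc = acc ++ pvPOSfrom (sents.map String.toList) i pairs := by
  induction pairs with
  | nil => intro i acc; simp [pvA_posLoop, pvPOSfrom]
  | cons pair rest ih =>
    intro i acc
    show pvA_posLoop sents (i + 1) rest
        (acc ++ [[PySem.Str.strip (pvLPA sents i ++ " " ++ pair.1),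
                  PySem.Str.strip (pair.2 ++ " " ++ pvRNA sents i 2)]]) = _
    rw [ih (i + 1) _]
    rw [pv_strip_append_str (pvLPA sents i) pair.1, pv_strip_append_str pair.2 (pvRNA sents i 2),
      pv_LPA_toList, pv_RNA_pos sents i]
    show _ = acc ++ pvPOSfrom (sents.map String.toList) i (pair :: rest)
    rw [show pvPOSfrom (sents.map String.toList) i (pair :: rest)
        = pvRend (pvLP (sents.map String.toList) i)
            (pvRN (sents.map String.toList) (min (i + 2) (sents.map String.toList).length))
            (pair.1.toList, pair.2.toList)
          :: pvPOSfrom (sents.map String.toList) (i + 1) rest from rfl]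
    simp [pvRend, List.append_assoc, List.length_map]

-- B outer loops
lemma pv_B_negOuter_eq (sents : List String) : ∀ (rest : List String) (i : Nat),
    pvB_negOuter sents i rest = pvNEGfrom (sents.map String.toList) i (rest.map String.toList) := by
  intro rest
  induction rest with
  | nil => intro i; rfl
  | cons st rest ih =>
    intro i
    show ((if (st.toList.splitOn ' ').length > 1 then
            pvB_negSent (PySem.Str.join " " (sents.take i)).toList
              (PySem.Str.join " " ((sents.take (sents.length - 1)).drop (i + 1))).toList
              (st.toList.splitOn ' ')
          else []) ++ pvB_negOuter sents (i + 1) rest) = _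
    rw [pv_BLP_toList, pv_BRN_toList, pv_negGuard, ih (i + 1)]
    rfl

lemma pv_B_posLoop_eq (sents : List String) (pairs : List (String × String)) : ∀ (i : Nat),
    pvB_posLoop sents sents.length i pairs = pvPOSfrom (sents.map String.toList) i pairs := by
  induction pairs with
  | nil => intro i; rfl
  | cons pair rest ih =>
    intro i
    show [PySem.Str.strip (PySem.Str.join " " (sents.take i) ++ " " ++ pair.1),
          PySem.Str.strip (pair.2 ++ " " ++ PySem.Str.join " " ((sents.take (sents.length - 1)).drop (min (i + 2) sents.length)))]
        :: pvB_posLoop sents sents.length (i + 1) rest = _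
    rw [pv_strip_append_str, pv_strip_append_str, pv_BLP_toList, pv_BRN_toList, ih (i + 1)]
    show _ = pvRend (pvLP (sents.map String.toList) i)
        (pvRN (sents.map String.toList) (min (i + 2) (sents.map String.toList).length))
        (pair.1.toList, pair.2.toList)
      :: pvPOSfrom (sents.map String.toList) (i + 1) rest
    simp [pvRend]

-- ===== VERDICT (by name: the statement is the Claim_ definition above) =====
theorem genTrainingExamplesTrans_spec : Claim_equal_genTrainingExamplesTrans := by
  intro pairs sents _dom
  unfold Spec_genTrainingExamplesTrans genTrainingExamplesTrans genTrainingExamplesTrans_alt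
  show (pvA_posLoop sents 0 pairs [], pvA_negOuter sents 0 sents [])
      = (pvB_posLoop sents sents.length 0 pairs, pvB_negOuter sents 0 sents)
  rw [pv_A_posLoop_eq sents pairs 0 [], pv_B_posLoop_eq sents pairs 0]
  rw [pv_A_negOuter_eq sents sents 0 [] List.drop_zero, pv_B_negOuter_eq sents sents 0]
  simp
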